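-- pv_equiv track=rewrite | github.com/sacheenanand/pythonbasics | threecopies.py | three_char
-- ===== SOURCE A (Python) =====
-- def three_char(string):
--     count=0
--     empty_string = ""
--     for i in string:
--         if i not in empty_string:
--             empty_string += i
--             count+=1
--         if count>2:
--             break
--     return empty_string+empty_string+empty_string
-- ===== SOURCE B (Python) =====
-- def three_char(string):
--     def firsts(s, k):
--         if k == 0 or s == "":
--             return ""
--         return s[0] + firsts(s.replace(s[0], ""), k - 1)
--     return firsts(string, 3) * 3
-- ===== Notes on version B (the rewrite author's own statement) =====
-- stated objective: alternative
-- what changed: Replaces A's single-pass accumulator loop with membership test, counter and break by a recursive head-then-filter scheme: take the first character, delete all its occurrences with str.replace, recurse for the remaining (at most 2) distinct characters, and triple the result with *.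
import Mathlib
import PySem

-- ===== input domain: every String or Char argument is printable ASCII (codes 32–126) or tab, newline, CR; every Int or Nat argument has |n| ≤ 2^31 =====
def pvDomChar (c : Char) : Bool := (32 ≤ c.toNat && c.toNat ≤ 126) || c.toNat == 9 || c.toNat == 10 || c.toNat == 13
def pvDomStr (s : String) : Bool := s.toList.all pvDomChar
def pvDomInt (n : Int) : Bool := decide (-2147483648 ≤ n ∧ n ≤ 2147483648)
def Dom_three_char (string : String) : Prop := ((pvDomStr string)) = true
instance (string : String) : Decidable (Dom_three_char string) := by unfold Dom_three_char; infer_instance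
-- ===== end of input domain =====

-- B replaces A's accumulator loop (membership test, counter, break) by a recursive
-- head-then-delete-all-occurrences scheme (str.replace), tripled with *.

-- ===== PORT A =====
-- the for-loop of A: state = (empty_string as List Char, count); 'break' = returning the state early
def threeCharLoop : List Char → List Char → Int → List Char
  | [], acc, _ => acc
  | i :: rest, acc, count =>
    if ¬ acc.contains i then
      let acc' := acc ++ [i]
      let count' := count + 1
      if count' > 2 then acc' else threeCharLoop rest acc' count'
    else
      if count > 2 then acc else threeCharLoop rest acc count

def three_char (string : String) : String :=
  let empty_string := threeCharLoop string.toList [] 0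
  String.ofList (empty_string ++ empty_string ++ empty_string)

-- ===== PORT B =====
-- firsts(s, k): head char, then recurse (on k) with every occurrence of the head removed (s.replace(s[0], ""))
def threeCharFirsts : List Char → Nat → List Char
  | _, 0 => []
  | [], _ + 1 => []
  | c :: rest, k + 1 => c :: threeCharFirsts (rest.filter (· ≠ c)) k

def three_char_alt (string : String) : String :=
  let pfx := String.ofList (threeCharFirsts string.toList 3)
  pfx ++ pfx ++ pfx

-- ===== PRECONDITION & SPEC =====
def Spec_three_char (string : String) (out : String) : Prop := out = three_char_alt string
instance (string : String) (out : String) : Decidable (Spec_three_char string out) := by unfold Spec_three_char; infer_instance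

-- ===== CLAIM (what is proved, stated in full; the proofs are below) =====
def Claim_equal_three_char : Prop := ∀ (string : String), Dom_three_char string → Spec_three_char string (three_char string)

-- ===== LEMMAS AND PROOFS =====

-- the whole ordered-unique character sequence, by B's head-then-filter recursion without the 3-bound
def orderedDistinct : List Char → List Char
  | [] => []
  | c :: rest => c :: orderedDistinct (rest.filter (· ≠ c))
termination_by l => l.length
decreasing_by
  simp
  exact le_trans (List.length_filter_le _ rest.attach) (Nat.le_of_eq List.length_attach)

theorem od_nil : orderedDistinct [] = [] := by unfold orderedDistinct; rfl

theorem od_cons (c : Char) (rest : List Char) :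
    orderedDistinct (c :: rest) = c :: orderedDistinct (rest.filter (· ≠ c)) := by
  conv_lhs => unfold orderedDistinct

-- B's bounded recursion is the k-prefix of the full ordered-unique sequence
theorem firsts_eq_take_aux (n : Nat) : ∀ (l : List Char), l.length ≤ n → ∀ (k : Nat),
    threeCharFirsts l k = (orderedDistinct l).take k := by
  induction n with
  | zero =>
    intro l hl k
    have : l = [] := List.eq_nil_of_length_eq_zero (by omega)
    subst this
    cases k <;> simp [threeCharFirsts, od_nil]
  | succ n ih =>
    intro l hl k
    cases l with
    | nil => cases k <;> simp [threeCharFirsts, od_nil]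
    | cons c rest =>
      cases k with
      | zero => simp [threeCharFirsts]
      | succ k =>
        simp [threeCharFirsts, od_cons]
        exact ih _ (le_trans (List.length_filter_le _ _) (by simp at hl; omega)) k

theorem firsts_eq_take (l : List Char) (k : Nat) :
    threeCharFirsts l k = (orderedDistinct l).take k :=
  firsts_eq_take_aux l.length l le_rfl k

-- the set-building fold computes the ordered-unique sequence (continued from any accumulator)
theorem foldl_add_eq_od (l : List Char) : ∀ (acc : List Char),
    List.foldl PySem.Set.add acc l = acc ++ orderedDistinct (l.filter (fun x => !(acc.contains x))) := by
  induction l with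
  | nil => intro acc; simp [od_nil]
  | cons i rest ih =>
    intro acc
    simp only [List.foldl_cons]
    by_cases hm : i ∈ acc
    · have hadd : PySem.Set.add acc i = acc := by simp [PySem.Set.add, hm]
      rw [hadd, ih acc, List.filter_cons]
      simp [hm]
    · have hadd : PySem.Set.add acc i = acc ++ [i] := by simp [PySem.Set.add, hm]
      have h1 : (i :: rest).filter (fun x => !(acc.contains x))
          = i :: rest.filter (fun x => !(acc.contains x)) := by simp [hm]
      have h2 : rest.filter (fun x => !((acc ++ [i]).contains x))
          = (rest.filter (fun x => !(acc.contains x))).filter (· ≠ i) := by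
        rw [List.filter_filter]
        apply List.filter_congr
        intro x _
        by_cases hx : x = i
        · simp [hx, hm]
        · simp [hx]
      rw [hadd, ih (acc ++ [i]), h1, od_cons, h2]
      simp

-- A's loop with count = acc.length computes the first three of the ordered-unique continuation of acc
theorem loop_eq_take (l : List Char) : ∀ (acc : List Char), acc.length ≤ 2 →
    threeCharLoop l acc (acc.length : Int) = (List.foldl PySem.Set.add acc l).take 3 := by
  induction l with
  | nil =>
    intro acc h
    simp [threeCharLoop, List.take_of_length_le (by omega : acc.length ≤ 3)]
  | cons i rest ih =>
    intro acc h
    simp only [threeCharLoop, List.foldl_cons]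
    by_cases hc : acc.contains i = true
    · have hng : ¬ ((acc.length : Int) > 2) := by omega
      have hmem : i ∈ acc := by simpa using hc
      simp [PySem.Set.add, hng, hmem, ih acc h]
    · have hmem : i ∉ acc := by simpa using hc
      have hadd : PySem.Set.add acc i = acc ++ [i] := by simp [PySem.Set.add, hmem]
      rw [hadd]
      by_cases h2 : acc.length = 2
      · have hgt : (acc.length : Int) + 1 > 2 := by omega
        simp only [hc, if_pos hgt]
        obtain ⟨t, ht⟩ : ∃ t, List.foldl PySem.Set.add (acc ++ [i]) rest = (acc ++ [i]) ++ t :=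
          ⟨_, foldl_add_eq_od rest (acc ++ [i])⟩
        rw [ht, List.take_append]
        have hlen : (acc ++ [i]).length = 3 := by simp [h2]
        rw [List.take_of_length_le (by omega), hlen]
        simp
      · have hng : ¬ ((acc.length : Int) + 1 > 2) := by omega
        have := ih (acc ++ [i]) (by simp; omega)
        simp only [List.length_append, List.length_cons, List.length_nil] at this
        simp only [hc, if_neg hng]
        rw [show ((acc.length : Int) + 1) = (((acc.length + 1 : Nat)) : Int) by push_cast; ring]
        simpa using this

theorem loops_agree (l : List Char) :
    threeCharLoop l [] 0 = threeCharFirsts l 3 := by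
  have h := loop_eq_take l [] (by simp)
  have h2 := foldl_add_eq_od l []
  simp only [List.contains_nil, Bool.not_false, List.filter_true, List.nil_append] at h2
  rw [firsts_eq_take]
  simpa [h2] using h

-- ===== VERDICT (by name: the statement is the Claim_ definition above) =====
theorem three_char_spec : Claim_equal_three_char := by
  intro s _
  unfold Spec_three_char three_char three_char_alt
  rw [loops_agree]
  apply String.toList_injective
  simp
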